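-- pv_equiv track=rewrite | github.com/mominimtiaz786/Problems-Solving | 1381-maximum-score-words-formed-by-letters/maximum-score-words-formed-by-letters.py | combSum
-- ===== SOURCE A (Python) =====
-- def combSum(words, lettersCount, score):
--     combSum = 0
--     wordsLetterCounter = dict()
--     for word in words:
--         for ch in word:
--             wordsLetterCounter[ch] = wordsLetterCounter.get(ch,0) + 1
--
--     for letter in wordsLetterCounter:
--         if wordsLetterCounter[letter] > lettersCount.get(letter, 0):
--             return 0
--         else:
--             combSum+=(wordsLetterCounter[letter]*score[(ord(letter)- ord('a'))])
--
--     return combSum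
-- ===== SOURCE B (Python) =====
-- def combSum(words, lettersCount, score):
--     budget = dict(lettersCount)
--     for word in words:
--         for ch in word:
--             if budget.get(ch, 0) <= 0:
--                 return 0
--             budget[ch] -= 1
--     return sum(score[ord(ch) - ord('a')] for word in words for ch in word)
-- ===== Notes on version B (the rewrite author's own statement) =====
-- stated objective: alternative
-- what changed: Instead of building a character counter and comparing counts against allowances per distinct letter, B simulates consuming a mutable letter budget char by char (failing the moment a budget runs out) and, if the budget suffices, scores by a flat per-character sum over all words.
import Mathlib
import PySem

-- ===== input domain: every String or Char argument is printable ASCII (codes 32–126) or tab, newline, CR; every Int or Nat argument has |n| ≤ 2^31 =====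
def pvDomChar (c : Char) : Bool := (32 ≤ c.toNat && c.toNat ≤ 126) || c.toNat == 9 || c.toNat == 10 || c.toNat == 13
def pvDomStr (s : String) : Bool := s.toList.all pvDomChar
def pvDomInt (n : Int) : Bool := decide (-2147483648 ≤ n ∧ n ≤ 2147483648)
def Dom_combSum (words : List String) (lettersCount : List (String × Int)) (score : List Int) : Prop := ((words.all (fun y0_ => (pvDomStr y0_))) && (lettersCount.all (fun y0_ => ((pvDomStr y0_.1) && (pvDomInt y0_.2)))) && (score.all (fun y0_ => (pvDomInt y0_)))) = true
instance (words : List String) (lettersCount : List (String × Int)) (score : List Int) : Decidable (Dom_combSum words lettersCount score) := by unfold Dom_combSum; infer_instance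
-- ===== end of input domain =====

-- B replaces A's build-a-counter-then-compare-counts algorithm by a char-by-char simulation that
-- consumes a mutable letter budget (failing as soon as a letter's budget is exhausted), followed by
-- a flat per-character scoring sum (objective: alternative).

-- ===== PORT A =====
-- A's second loop: iterate the counter's keys; early `return 0` at the first infeasible letter,
-- otherwise accumulate count*score[ord(letter)-97].  (`getD … 0` where Python indexes a key that is
-- always present; `(pyGet? …).getD 0` is only reached where Python's score[…] succeeds — inputs on
-- which score[…] raises IndexError are excluded by Pre_combSum.)
def combSumLoopA (lettersCount : List (String × Int)) (score : List Int)
    (counter : PySem.Dict Char Int) : List Char → Int → Int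
  | [], acc => acc
  | c :: rest, acc =>
    if counter.getD c 0 > (PySem.Dict.mk lettersCount).getD (String.ofList [c]) 0 then 0
    else combSumLoopA lettersCount score counter rest
      (acc + counter.getD c 0 * (PySem.List.pyGet? score ((c.toNat : Int) - 97)).getD 0)

-- the counter built by A's first (nested) loop
def combSumCounter (words : List String) : PySem.Dict Char Int :=
  words.foldl (fun d w => w.toList.foldl (fun d ch => d.insert ch (d.getD ch 0 + 1)) d) PySem.Dict.empty

def combSum (words : List String) (lettersCount : List (String × Int)) (score : List Int) : Int :=
  combSumLoopA lettersCount score (combSumCounter words) (combSumCounter words).keys 0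

-- ===== PORT B =====
-- B's inner loop over one word's characters: `if budget.get(ch, 0) <= 0: return 0` (none = that
-- early return), `budget[ch] -= 1` otherwise; returns the remaining budget.
def altBudgetChars (budget : PySem.Dict String Int) : List Char → Option (PySem.Dict String Int)
  | [] => some budget
  | ch :: rest =>
    if budget.getD (String.ofList [ch]) 0 ≤ 0 then none
    else altBudgetChars (budget.insert (String.ofList [ch]) (budget.getD (String.ofList [ch]) 0 - 1)) rest

-- B's outer loop over the words
def altBudgetWords (budget : PySem.Dict String Int) : List String → Option (PySem.Dict String Int)
  | [] => some budget
  | w :: rest =>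
    match altBudgetChars budget w.toList with
    | none => none
    | some b' => altBudgetWords b' rest

-- B's final line: sum(score[ord(ch) - ord('a')] for word in words for ch in word)
def altScoreSum (words : List String) (score : List Int) : Int :=
  (words.flatMap (fun w => w.toList.map (fun ch => (PySem.List.pyGet? score ((ch.toNat : Int) - 97)).getD 0))).sum

def combSum_alt (words : List String) (lettersCount : List (String × Int)) (score : List Int) : Int :=
  match altBudgetWords (PySem.Dict.mk lettersCount) words with
  | none => 0
  | some _ => altScoreSum words score

-- ===== PRECONDITION & SPEC =====
-- Pre_ excludes exactly the inputs on which Python A raises IndexError: those where, scanning the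
-- distinct characters of the words in first-occurrence order, the first character that is infeasible
-- or has a score index outside [-len(score), len(score)) is a feasible one with such an out-of-range index.
def Pre_combSum (words : List String) (lettersCount : List (String × Int)) (score : List Int) : Prop :=
  let L := PySem.Set.ofList (words.flatMap (fun w => w.toList))
  ∀ i, (h : i < L.length) →
    ((L.take (i + 1)).all (fun c => (PySem.List.count (words.flatMap (fun w => w.toList)) c : Int) ≤ (PySem.Dict.mk lettersCount).getD (String.ofList [c]) 0) = true) →
    (-(score.length : Int) ≤ (L[i].toNat : Int) - 97 ∧ (L[i].toNat : Int) - 97 < (score.length : Int))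
instance (words : List String) (lettersCount : List (String × Int)) (score : List Int) : Decidable (Pre_combSum words lettersCount score) := by unfold Pre_combSum; infer_instance

def pvWitness_combSum : List String × (List (String × Int)) × List Int :=
  (["ab"], [("a", 2), ("b", 1)], [3, 5])

def Spec_combSum (words : List String) (lettersCount : List (String × Int)) (score : List Int) (out : Int) : Prop := out = combSum_alt words lettersCount score
instance (words : List String) (lettersCount : List (String × Int)) (score : List Int) (out : Int) : Decidable (Spec_combSum words lettersCount score out) := by unfold Spec_combSum; infer_instance

-- ===== CLAIM (what is proved, stated in full; the proofs are below) =====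
def Claim_equal_combSum : Prop := ∀ (words : List String) (lettersCount : List (String × Int)) (score : List Int), Dom_combSum words lettersCount score → Pre_combSum words lettersCount score → Spec_combSum words lettersCount score (combSum words lettersCount score)

-- ===== LEMMAS AND PROOFS =====

-- single-character strings are distinct for distinct characters
lemma ofList_single_inj {c d : Char} (h : String.ofList [c] = String.ofList [d]) : c = d := by
  have := congrArg String.toList h
  simpa using this

-- A's nested counting loop over words/chars is the same fold over the flattened character list.
lemma foldl_foldl_toList (words : List String)
    (f : PySem.Dict Char Int → Char → PySem.Dict Char Int) (d : PySem.Dict Char Int) :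
    words.foldl (fun d w => w.toList.foldl f d) d = (words.flatMap (fun w => w.toList)).foldl f d := by
  induction words generalizing d with
  | nil => rfl
  | cons w ws ih => simp [List.foldl_append, ih]

-- B's nested budget loop over words/chars is the budget loop over the flattened character list.
lemma altBudgetWords_eq_flat (words : List String) (b : PySem.Dict String Int) :
    altBudgetWords b words = altBudgetChars b (words.flatMap (fun w => w.toList)) := by
  induction words generalizing b with
  | nil => rfl
  | cons w ws ih =>
    have happ : ∀ (xs ys : List Char) (b : PySem.Dict String Int),
        altBudgetChars b (xs ++ ys) =
          match altBudgetChars b xs with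
          | none => none
          | some b' => altBudgetChars b' ys := by
      intro xs
      induction xs with
      | nil => intro ys b; rfl
      | cons x t ihx =>
        intro ys b
        simp only [List.cons_append, altBudgetChars]
        split
        · rfl
        · exact ihx ys _
    simp only [altBudgetWords, List.flatMap_cons, happ, ih]

-- The budget simulation fails exactly when some character occurs more often than its budget.
lemma altBudgetChars_none_iff (xs : List Char) (b : PySem.Dict String Int) :
    altBudgetChars b xs = none ↔
      ∃ c ∈ xs, (xs.count c : Int) > b.getD (String.ofList [c]) 0 := by
  induction xs generalizing b with
  | nil => simp [altBudgetChars]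
  | cons ch rest ih =>
    by_cases h0 : b.getD (String.ofList [ch]) 0 ≤ 0
    · simp only [altBudgetChars, if_pos h0]
      refine iff_of_true trivial ⟨ch, by simp, ?_⟩
      have h1 : 0 < (ch :: rest).count ch := List.count_pos_iff.2 List.mem_cons_self
      have h1' : (1 : Int) ≤ ((ch :: rest).count ch : Int) := by exact_mod_cast h1
      omega
    · rw [not_le] at h0
      simp only [altBudgetChars, if_neg (not_le.2 h0)]
      rw [ih]
      constructor
      · rintro ⟨c, hc, hgt⟩
        rw [PySem.Dict.getD_insert] at hgt
        by_cases hcc : c = ch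
        · subst hcc
          rw [if_pos rfl] at hgt
          refine ⟨c, by simp, ?_⟩
          simp only [List.count_cons_self]
          push_cast
          omega
        · rw [if_neg (fun h => hcc (ofList_single_inj h))] at hgt
          refine ⟨c, by simp [hc], ?_⟩
          rw [List.count_cons_of_ne (Ne.symm hcc)]
          exact hgt
      · rintro ⟨c, hc, hgt⟩
        by_cases hcc : c = ch
        · subst hcc
          have hmem : c ∈ rest := by
            rcases Nat.eq_zero_or_pos (rest.count c) with hz | hp
            · exfalso
              simp only [List.count_cons_self, hz] at hgt
              push_cast at hgt
              omega
            · exact List.count_pos_iff.1 hp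
          refine ⟨c, hmem, ?_⟩
          rw [PySem.Dict.getD_insert, if_pos rfl]
          simp only [List.count_cons_self] at hgt
          push_cast at hgt ⊢
          omega
        · have hmem : c ∈ rest := by
            rcases List.mem_cons.1 hc with h | h
            · exact absurd h hcc
            · exact h
          refine ⟨c, hmem, ?_⟩
          rw [PySem.Dict.getD_insert, if_neg (fun h => hcc (ofList_single_inj h))]
          rw [List.count_cons_of_ne (Ne.symm hcc)] at hgt
          exact hgt

-- If some key in the remaining list fails the feasibility test, A's loop returns 0.
lemma combSumLoopA_bad (lettersCount : List (String × Int)) (score : List Int)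
    (counter : PySem.Dict Char Int) (ks : List Char) (acc : Int)
    (h : ∃ c ∈ ks, counter.getD c 0 > (PySem.Dict.mk lettersCount).getD (String.ofList [c]) 0) :
    combSumLoopA lettersCount score counter ks acc = 0 := by
  induction ks generalizing acc with
  | nil => simp at h
  | cons c rest ih =>
    by_cases hc : counter.getD c 0 > (PySem.Dict.mk lettersCount).getD (String.ofList [c]) 0
    · simp [combSumLoopA, hc]
    · rcases h with ⟨d, hd, hbad⟩
      rcases List.mem_cons.1 hd with hd | hd
      · exact absurd (hd ▸ hbad) hc
      · simp only [combSumLoopA, if_neg hc]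
        exact ih _ ⟨d, hd, hbad⟩

-- If every key passes, A's loop is the accumulator plus the weighted sum over the keys.
lemma combSumLoopA_good (lettersCount : List (String × Int)) (score : List Int)
    (counter : PySem.Dict Char Int) (ks : List Char) (acc : Int)
    (h : ∀ c ∈ ks, ¬ counter.getD c 0 > (PySem.Dict.mk lettersCount).getD (String.ofList [c]) 0) :
    combSumLoopA lettersCount score counter ks acc =
      acc + (ks.map (fun c => counter.getD c 0 * (PySem.List.pyGet? score ((c.toNat : Int) - 97)).getD 0)).sum := by
  induction ks generalizing acc with
  | nil => simp [combSumLoopA]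
  | cons c rest ih =>
    have hc := h c (by simp)
    simp only [combSumLoopA, if_neg hc]
    rw [ih _ (fun d hd => h d (by simp [hd]))]
    simp [List.sum_cons]; ring

-- splitting a sum over a list by a Boolean test
lemma sum_split (xs : List Char) (g : Char → Int) (p : Char → Bool) :
    (xs.map g).sum = ((xs.filter p).map g).sum + ((xs.filter (fun a => !p a)).map g).sum := by
  induction xs with
  | nil => simp
  | cons x t ih =>
    by_cases hx : p x <;> simp [hx, ih] <;> ring

-- a sum over a list equals the count-weighted sum over any Nodup list containing all its elements
lemma sum_count_weighted (L : List Char) (g : Char → Int) :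
    ∀ xs : List Char, L.Nodup → (∀ x ∈ xs, x ∈ L) →
    (L.map (fun c => (xs.count c : Int) * g c)).sum = (xs.map g).sum := by
  induction L with
  | nil =>
    intro xs _ hcov
    have : xs = [] := List.eq_nil_iff_forall_not_mem.2 (fun a ha => by simpa using hcov a ha)
    simp [this]
  | cons c rest ih =>
    intro xs hnd hcov
    have hnd' := hnd
    rw [List.nodup_cons] at hnd'
    rw [sum_split xs g (· == c)]
    have hf : xs.filter (· == c) = List.replicate (xs.count c) c := List.filter_beq c
    have h1 : ((xs.filter (· == c)).map g).sum = (xs.count c : Int) * g c := by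
      rw [hf]; simp [List.map_replicate, List.sum_replicate, mul_comm]
    have hcnt : ∀ d ∈ rest, ((xs.filter (fun a => !(a == c))).count d : Int) = (xs.count d : Int) := by
      intro d hd
      have hdc : d ≠ c := fun h => hnd'.1 (h ▸ hd)
      congr 1
      rw [List.count_filter]
      simp [hdc]
    have h2 : (rest.map (fun d => ((xs.filter (fun a => !(a == c))).count d : Int) * g d)).sum
        = ((xs.filter (fun a => !(a == c))).map g).sum := by
      apply ih _ hnd'.2
      intro x hx
      have hx' := List.mem_of_mem_filter hx
      have hxc : ¬ (x == c) = true := by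
        have := List.of_mem_filter hx; simpa using this
      rcases List.mem_cons.1 (hcov x hx') with h | h
      · exact absurd (by simp [h]) hxc
      · exact h
    rw [List.map_cons, List.sum_cons, ← h2, h1]
    refine congrArg (fun z => (xs.count c : Int) * g c + z) (congrArg List.sum (List.map_congr_left fun d hd => ?_))
    rw [← hcnt d hd]

lemma sum_over_ofList (xs : List Char) (g : Char → Int) :
    ((PySem.Set.ofList xs).map (fun c => (xs.count c : Int) * g c)).sum = (xs.map g).sum :=
  sum_count_weighted _ g xs (PySem.Set.nodup_ofList xs) (fun x hx => (PySem.Set.mem_ofList xs x).2 hx)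

-- ===== VERDICT (by name: the statement is the Claim_ definition above) =====
theorem combSum_spec : Claim_equal_combSum := by
  intro words lettersCount score _ _
  unfold Spec_combSum combSum combSum_alt combSumCounter
  rw [foldl_foldl_toList, PySem.Dict.foldl_insert_getD_add_one_eq_counter,
      PySem.Dict.keys_counter, altBudgetWords_eq_flat]
  set xs := words.flatMap (fun w => w.toList) with hxs
  by_cases hbad : ∃ c ∈ xs, ((xs.count c : Int) > (PySem.Dict.mk lettersCount).getD (String.ofList [c]) 0)
  · -- infeasible: both sides 0
    rw [(altBudgetChars_none_iff xs (PySem.Dict.mk lettersCount)).2 hbad]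
    rcases hbad with ⟨c, hc, hgt⟩
    refine combSumLoopA_bad _ _ _ _ _ ⟨c, (PySem.Set.mem_ofList xs c).2 hc, ?_⟩
    rw [PySem.Dict.getD_counter]
    exact hgt
  · -- feasible: weighted distinct sum = flat per-character sum
    have hsome : altBudgetChars (PySem.Dict.mk lettersCount) xs ≠ none := by
      intro h
      exact hbad ((altBudgetChars_none_iff xs (PySem.Dict.mk lettersCount)).1 h)
    rcases Option.ne_none_iff_exists'.1 hsome with ⟨b', hb'⟩
    rw [hb']
    have hok : ∀ c ∈ PySem.Set.ofList xs,
        ¬ (PySem.Dict.counter xs).getD c 0 > (PySem.Dict.mk lettersCount).getD (String.ofList [c]) 0 := by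
      intro c hc hgt
      rw [PySem.Dict.getD_counter] at hgt
      exact hbad ⟨c, (PySem.Set.mem_ofList xs c).1 hc, hgt⟩
    rw [combSumLoopA_good _ _ _ _ _ hok, zero_add]
    simp only [altScoreSum]
    rw [← List.map_flatMap, ← hxs]
    rw [← sum_over_ofList xs (fun c => (PySem.List.pyGet? score ((c.toNat : Int) - 97)).getD 0)]
    refine congrArg List.sum (List.map_congr_left fun c hc => ?_)
    rw [PySem.Dict.getD_counter]
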